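-- pv_equiv track=rewrite | github.com/guraltsev/math-of-signals | content/gu_toolkit/numpify.py | _build_runtime_name_map
-- ===== SOURCE A (Python) =====
-- import keyword
-- from collections.abc import Callable, Iterable, Mapping
--
-- def _is_valid_parameter_name(name: str) -> bool:
--     return bool(name) and name.isidentifier() and not keyword.iskeyword(name)
--
-- def _mangle_base_name(name: str) -> str:
--     cleaned = "".join(ch if (ch == "_" or ch.isalnum()) else "_" for ch in name)
--     if not cleaned or cleaned[0].isdigit():
--         cleaned = f"_{cleaned}"
--     if keyword.iskeyword(cleaned):
--         cleaned = f"{cleaned}__"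
--     return cleaned
--
-- def _build_runtime_name_map(
--     raw_names: Iterable[str], reserved_names: set[str]
-- ) -> dict[str, str]:
--     """Allocate valid Python identifiers for runtime-only names."""
--
--     used = set(reserved_names)
--     mapping: dict[str, str] = {}
--     for raw_name in raw_names:
--         base = raw_name if _is_valid_parameter_name(raw_name) else _mangle_base_name(raw_name)
--         candidate = base
--         suffix = 0
--         while candidate in used or not _is_valid_parameter_name(candidate):
--             candidate = f"{base}__{suffix}"
--             suffix += 1
--         used.add(candidate)
--         mapping[raw_name] = candidate
--     return mapping
-- ===== SOURCE B (Python) =====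
-- # B: instead of probing 'used' with successively formatted candidates base__0, base__1, ...,
-- # scan 'used' once per colliding name to index the suffix tails that follow "base__", then
-- # take the least j whose decimal string is not among them; same mapping, different mechanism.
-- # keyword.kwlist of CPython, inlined ('keyword' may not be imported here)
-- _KEYWORDS = frozenset([
--     "False", "None", "True", "and", "as", "assert", "async", "await", "break",
--     "class", "continue", "def", "del", "elif", "else", "except", "finally",
--     "for", "from", "global", "if", "import", "in", "is", "lambda", "nonlocal",
--     "not", "or", "pass", "raise", "return", "try", "while", "with", "yield",
-- ])
--
--
-- def _is_valid_parameter_name(name: str) -> bool: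
--     return bool(name) and name.isidentifier() and name not in _KEYWORDS
--
--
-- def _mangle_base_name(name: str) -> str:
--     cleaned = "".join(ch if (ch == "_" or ch.isalnum()) else "_" for ch in name)
--     if not cleaned or cleaned[0].isdigit():
--         cleaned = f"_{cleaned}"
--     if cleaned in _KEYWORDS:
--         cleaned = f"{cleaned}__"
--     return cleaned
--
--
-- def _build_runtime_name_map(raw_names, reserved_names):
--     # The base is always a valid identifier (mangling guarantees it), and so is every
--     # base__N, so resolving a collision only amounts to finding the least free suffix.
--     used = set(reserved_names)
--     mapping = {}
--     for raw_name in raw_names: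
--         base = raw_name if _is_valid_parameter_name(raw_name) else _mangle_base_name(raw_name)
--         if base in used:
--             prefix = base + "__"
--             p = len(prefix)
--             tails = {name[p:] for name in used if name.startswith(prefix)}
--             j = 0
--             while str(j) in tails:
--                 j += 1
--             candidate = prefix + str(j)
--         else:
--             candidate = base
--         used.add(candidate)
--         mapping[raw_name] = candidate
--     return mapping
-- ===== Notes on version B (the rewrite author's own statement) =====
-- stated objective: alternative
-- what changed: B never probes 'used' with formatted candidates: it relies on mangled bases (and hence every base__N) being valid identifiers, so on a collision it scans 'used' once to collect the suffix tails following base+'__' and returns the first j whose decimal string is absent from that index, instead of A's retry loop that formats base__0, base__1, ... and re-tests each candidate for set membership and identifier-validity.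
import Mathlib
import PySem

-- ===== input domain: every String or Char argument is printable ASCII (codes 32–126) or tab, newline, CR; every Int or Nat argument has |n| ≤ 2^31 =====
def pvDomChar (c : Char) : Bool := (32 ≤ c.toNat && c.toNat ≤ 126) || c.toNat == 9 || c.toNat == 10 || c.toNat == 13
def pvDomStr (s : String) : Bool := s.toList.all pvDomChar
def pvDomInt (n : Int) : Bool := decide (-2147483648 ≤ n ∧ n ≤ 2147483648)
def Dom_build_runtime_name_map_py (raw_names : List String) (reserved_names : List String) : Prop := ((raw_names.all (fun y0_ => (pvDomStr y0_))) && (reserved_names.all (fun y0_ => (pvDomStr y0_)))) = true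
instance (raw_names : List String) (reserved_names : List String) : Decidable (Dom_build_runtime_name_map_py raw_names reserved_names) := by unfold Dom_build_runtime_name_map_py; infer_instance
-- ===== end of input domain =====

-- B resolves a collision by scanning 'used' once to index the suffix tails after base+"__"
-- and taking the least absent decimal, instead of A's loop that formats and re-probes
-- candidates base__0, base__1, …; same return value, different mechanism ('alternative').

-- ===== PORT A =====
-- keyword.kwlist of CPython (keyword.iskeyword(s) = s in this list)
def pvKwlist : List String := ["False","None","True","and","as","assert","async","await","break","class","continue","def","del","elif","else","except","finally","for","from","global","if","import","in","is","lambda","nonlocal","not","or","pass","raise","return","try","while","with","yield"]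

-- name.isidentifier(); exact on the printable-ASCII domain: first char letter/underscore, rest letters/digits/underscore
def pvIsIdentifier (s : String) : Bool :=
  match s.toList with
  | [] => false
  | c :: cs => (c == '_' || PySem.Chars.isalpha c) && cs.all (fun ch => ch == '_' || PySem.Chars.isalnum ch)

-- _is_valid_parameter_name (module helper used by both A and B)
def pv_is_valid_parameter_name (name : String) : Bool :=
  !name.toList.isEmpty && pvIsIdentifier name && !pvKwlist.contains name

-- _mangle_base_name (module helper used by both A and B); string building done on the char level (exact)
def pv_mangle_base_name (name : String) : String :=
  let cleaned := String.ofList (name.toList.map (fun ch => if ch == '_' || PySem.Chars.isalnum ch then ch else '_'))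
  -- 'if not cleaned or cleaned[0].isdigit()': when cleaned is empty Python short-circuits,
  -- so the headD default '0' (a digit) lands in the same branch — exact
  let cleaned2 :=
    if cleaned.toList.isEmpty || PySem.Chars.isdigit (cleaned.toList.headD '0') then
      String.ofList ('_' :: cleaned.toList)
    else cleaned
  if pvKwlist.contains cleaned2 then String.ofList (cleaned2.toList ++ ['_', '_']) else cleaned2

-- f"{base}__{suffix}", built on the char level (exact)
def pvFmtCand (base : String) (suffix : Int) : String :=
  String.ofList (base.toList ++ '_' :: '_' :: PySem.Int.toChars suffix)

-- A's inner 'while candidate in used or not _is_valid_parameter_name(candidate)' loop;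
-- fuel only makes it total: used.length + 2 provably suffices (pvCond_exists_false below)
def pyA_candLoop (used : PySem.Set String) (base : String) (candidate : String) (suffix : Int) : Nat → String
  | 0 => candidate
  | fuel + 1 =>
    if used.contains candidate || !(pv_is_valid_parameter_name candidate) then
      pyA_candLoop used base (pvFmtCand base suffix) (suffix + 1) fuel
    else candidate

-- A's loop body over raw_names, state = (used, mapping)
def pvStepA (st : PySem.Set String × PySem.Dict String String) (raw_name : String) :
    PySem.Set String × PySem.Dict String String :=
  let base := if pv_is_valid_parameter_name raw_name then raw_name else pv_mangle_base_name raw_name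
  let candidate := pyA_candLoop st.1 base base 0 (st.1.length + 2)
  (st.1.add candidate, st.2.insert raw_name candidate)

def build_runtime_name_map_py (raw_names : List String) (reserved_names : List String) : List (String × String) :=
  (raw_names.foldl pvStepA (PySem.Set.ofList reserved_names, PySem.Dict.empty)).2.items

-- ===== PORT B =====
-- "tails = {name[p:] for name in used if name.startswith(prefix)}" — the set comprehension
-- is this fold building a Set; iterating the set 'used' is order-safe here: 'tails' is
-- itself a set used only for membership.
-- String ops done on the char level (exact): startswith = PySem.Chars.startswith, slice [k:] = drop.
def pvTails (used : PySem.Set String) (pre : List Char) : PySem.Set String :=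
  used.foldl
    (fun t name =>
      if PySem.Chars.startswith name.toList pre then
        t.add (String.ofList (name.toList.drop pre.length))
      else t)
    PySem.Set.empty

-- "j = 0; while str(j) in tails: j += 1"; fuel only makes it total:
-- tails.length + 1 provably suffices (pvCondB_exists_false below)
def pvMexLoop (tails : PySem.Set String) (j : Int) : Nat → Int
  | 0 => j
  | fuel + 1 =>
    if tails.contains (String.ofList (PySem.Int.toChars j)) then
      pvMexLoop tails (j + 1) fuel
    else j

-- B's loop body over raw_names, state = (used, mapping)
def pvStepB (st : PySem.Set String × PySem.Dict String String) (raw_name : String) :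
    PySem.Set String × PySem.Dict String String :=
  let base := if pv_is_valid_parameter_name raw_name then raw_name else pv_mangle_base_name raw_name
  if st.1.contains base then
    let pre := base.toList ++ ['_', '_']            -- prefix = base + "__"
    let tails := pvTails st.1 pre
    let j := pvMexLoop tails 0 (tails.length + 1)
    let candidate := String.ofList (pre ++ PySem.Int.toChars j)   -- prefix + str(j)
    (st.1.add candidate, st.2.insert raw_name candidate)
  else
    (st.1.add base, st.2.insert raw_name base)

def build_runtime_name_map_py_alt (raw_names : List String) (reserved_names : List String) : List (String × String) :=
  (raw_names.foldl pvStepB (PySem.Set.ofList reserved_names, PySem.Dict.empty)).2.items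

-- ===== PRECONDITION & SPEC =====
def Spec_build_runtime_name_map_py (raw_names : List String) (reserved_names : List String) (out : List (String × String)) : Prop := out = build_runtime_name_map_py_alt raw_names reserved_names
instance (raw_names : List String) (reserved_names : List String) (out : List (String × String)) : Decidable (Spec_build_runtime_name_map_py raw_names reserved_names out) := by unfold Spec_build_runtime_name_map_py; infer_instance

-- ===== CLAIM (what is proved, stated in full; the proofs are below) =====
def Claim_equal_build_runtime_name_map_py : Prop := ∀ (raw_names : List String) (reserved_names : List String), Dom_build_runtime_name_map_py raw_names reserved_names → Spec_build_runtime_name_map_py raw_names reserved_names (build_runtime_name_map_py raw_names reserved_names)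

-- ===== LEMMAS AND PROOFS =====

-- A's loop condition, as a predicate on the Nat suffix
def pvCond (used : PySem.Set String) (base : String) (j : Nat) : Bool :=
  used.contains (pvFmtCand base (j : Int)) || !(pv_is_valid_parameter_name (pvFmtCand base (j : Int)))

-- B's loop condition, as a predicate on the Nat suffix
def pvCondB (tails : PySem.Set String) (j : Nat) : Bool :=
  tails.contains (String.ofList (PySem.Int.toChars ((j : Nat) : Int)))

-- --- decimal digits: roundtrip, injectivity, digit-chars ---

lemma pvToDigitsCore_append (f : Nat) : ∀ (n : Nat) (acc : List Char),
    Nat.toDigitsCore 10 f n acc = Nat.toDigitsCore 10 f n [] ++ acc := by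
  induction f with
  | zero => intro n acc; simp [Nat.toDigitsCore]
  | succ f ih =>
    intro n acc
    simp only [Nat.toDigitsCore]
    by_cases h : n / 10 = 0
    · simp [h]
    · simp only [h, if_false]
      rw [ih (n / 10) (Nat.digitChar (n % 10) :: acc), ih (n / 10) [Nat.digitChar (n % 10)]]
      simp

lemma pvDigitChar_val (m : Nat) (h : m < 10) : (Nat.digitChar m).toNat - 48 = m := by
  interval_cases m <;> rfl

def pvVal (a : Nat) (l : List Char) : Nat := l.foldl (fun a c => 10 * a + (c.toNat - 48)) a

lemma pvVal_toDigitsCore (f : Nat) : ∀ (n a : Nat), n < f →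
    pvVal a (Nat.toDigitsCore 10 f n []) = a * 10 ^ (Nat.toDigitsCore 10 f n []).length + n := by
  induction f with
  | zero => omega
  | succ f ih =>
    intro n a hn
    simp only [Nat.toDigitsCore]
    by_cases h : n / 10 = 0
    · simp [h, pvVal, pvDigitChar_val (n % 10) (Nat.mod_lt _ (by norm_num))]
      omega
    · simp only [h, if_false]
      rw [pvToDigitsCore_append f (n / 10) [Nat.digitChar (n % 10)]]
      have hlt : n / 10 < f := by
        have h1 : n / 10 < n := Nat.div_lt_self (by omega) (by norm_num)
        omega
      have := ih (n / 10) a hlt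
      simp only [pvVal] at *
      rw [List.foldl_append]
      simp only [this, List.length_append, List.length_singleton, List.foldl_cons, List.foldl_nil,
        pvDigitChar_val (n % 10) (Nat.mod_lt _ (by norm_num))]
      rw [pow_succ]
      have := Nat.div_add_mod n 10
      ring_nf
      omega

lemma pvVal_toDigits (n : Nat) : pvVal 0 (Nat.toDigits 10 n) = n := by
  have := pvVal_toDigitsCore (n + 1) n 0 (by omega)
  simpa [Nat.toDigits] using this

lemma pvToDigits_inj {m n : Nat} (h : Nat.toDigits 10 m = Nat.toDigits 10 n) : m = n := by
  have hm := pvVal_toDigits m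
  have hn := pvVal_toDigits n
  rw [h] at hm; omega

lemma pvToDigitsCore_digits (f : Nat) : ∀ (n : Nat) (acc : List Char),
    (∀ c ∈ acc, PySem.Chars.isdigit c = true) →
    ∀ c ∈ Nat.toDigitsCore 10 f n acc, PySem.Chars.isdigit c = true := by
  induction f with
  | zero => intro n acc hacc; simpa [Nat.toDigitsCore] using hacc
  | succ f ih =>
    intro n acc hacc
    have hd : PySem.Chars.isdigit (Nat.digitChar (n % 10)) = true := by
      have : n % 10 < 10 := Nat.mod_lt _ (by norm_num)
      interval_cases h : (n % 10) <;> rfl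
    simp only [Nat.toDigitsCore]
    by_cases h : n / 10 = 0
    · simp only [h, if_true]
      intro c hc
      rcases List.mem_cons.mp hc with rfl | hc
      · exact hd
      · exact hacc c hc
    · simp only [h, if_false]
      refine ih (n / 10) _ ?_
      intro c hc
      rcases List.mem_cons.mp hc with rfl | hc
      · exact hd
      · exact hacc c hc

lemma pvToChars_natCast (j : Nat) : PySem.Int.toChars (j : Int) = Nat.toDigits 10 j := by
  simp [PySem.Int.toChars]

-- --- the candidate strings base__j ---

lemma pvFmtCand_toList (base : String) (s : Int) :
    (pvFmtCand base s).toList = base.toList ++ '_' :: '_' :: PySem.Int.toChars s := by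
  simp [pvFmtCand]

lemma pvStr_inj {i j : Nat}
    (h : String.ofList (PySem.Int.toChars (i : Int)) = String.ofList (PySem.Int.toChars (j : Int))) :
    i = j := by
  have h2 := congrArg String.toList h
  rw [String.toList_ofList, String.toList_ofList, pvToChars_natCast, pvToChars_natCast] at h2
  exact pvToDigits_inj h2

lemma pvKw_no_underscore : ∀ s ∈ pvKwlist, ('_' ∈ s.toList) → False := by decide

lemma pvValid_fmtCand (base : String) (j : Nat)
    (hv : pv_is_valid_parameter_name base = true) :
    pv_is_valid_parameter_name (pvFmtCand base (j : Int)) = true := by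
  have hTL := pvFmtCand_toList base (j : Int)
  rw [pvToChars_natCast] at hTL
  simp only [pv_is_valid_parameter_name, Bool.and_eq_true, Bool.not_eq_true',
    pvIsIdentifier] at hv ⊢
  obtain ⟨⟨hne, hid⟩, hkw⟩ := hv
  obtain ⟨c, cs, hbase⟩ : ∃ c cs, base.toList = c :: cs := by
    cases h : base.toList with
    | nil => rw [h] at hne; simp at hne
    | cons c cs => exact ⟨c, cs, rfl⟩
  rw [hbase] at hid hTL
  simp only [List.cons_append] at hTL
  refine ⟨⟨?_, ?_⟩, ?_⟩
  · rw [hTL]; simp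
  · rw [hTL]
    simp only [Bool.and_eq_true] at hid ⊢
    refine ⟨hid.1, ?_⟩
    rw [List.all_eq_true] at hid ⊢
    intro ch hch
    rcases List.mem_append.mp hch with hch | hch
    · exact hid.2 ch hch
    · rcases List.mem_cons.mp hch with rfl | hch
      · simp
      rcases List.mem_cons.mp hch with rfl | hch
      · simp
      · have hd := pvToDigitsCore_digits (j + 1) j [] (by simp) ch hch
        simp [PySem.Chars.isalnum, hd]
  · by_contra hmem
    simp only [Bool.not_eq_false] at hmem
    have hmem' : pvFmtCand base (j : Int) ∈ pvKwlist := List.mem_of_elem_eq_true hmem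
    exact pvKw_no_underscore _ hmem' (by rw [hTL]; simp)

lemma pvMangle_kernel (main : ∀ (c2 : String), (∃ c cs, c2.toList = c :: cs ∧
        (c == '_' || PySem.Chars.isalpha c) = true ∧
        (∀ ch ∈ cs, (ch == '_' || PySem.Chars.isalnum ch) = true)) →
      pv_is_valid_parameter_name
        (if pvKwlist.contains c2 then String.ofList (c2.toList ++ ['_', '_']) else c2) = true) :
    ∀ (l : List Char), (∀ ch ∈ l, (ch == '_' || PySem.Chars.isalnum ch) = true) →
    pv_is_valid_parameter_name
      (if pvKwlist.contains
            (if (String.ofList l).toList.isEmpty || PySem.Chars.isdigit ((String.ofList l).toList.headD '0') then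
               String.ofList ('_' :: (String.ofList l).toList)
             else String.ofList l) then
         String.ofList
           ((if (String.ofList l).toList.isEmpty || PySem.Chars.isdigit ((String.ofList l).toList.headD '0') then
               String.ofList ('_' :: (String.ofList l).toList)
             else String.ofList l).toList ++ ['_', '_'])
       else
         (if (String.ofList l).toList.isEmpty || PySem.Chars.isdigit ((String.ofList l).toList.headD '0') then
            String.ofList ('_' :: (String.ofList l).toList)
          else String.ofList l)) = true := by
  intro l hlch
  simp only [String.toList_ofList]
  cases l with
  | nil =>
    exact main _ ⟨'_', [], by simp, by simp, by simp⟩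
  | cons c cs =>
    have hc := hlch c (by simp)
    have hcs : ∀ ch ∈ cs, (ch == '_' || PySem.Chars.isalnum ch) = true := by
      intro ch hch; exact hlch ch (by simp [hch])
    simp only [List.isEmpty_cons, List.headD_cons, Bool.false_or]
    by_cases hd : PySem.Chars.isdigit c = true
    · rw [if_pos hd]
      refine main _ ⟨'_', c :: cs, by simp, by simp, ?_⟩
      intro ch hch
      rcases List.mem_cons.mp hch with rfl | hch
      · exact hc
      · exact hcs ch hch
    · rw [if_neg hd]
      refine main _ ⟨c, cs, by simp, ?_, hcs⟩
      rcases Bool.or_eq_true_iff.mp hc with h | h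
      · simp [h]
      · simp only [PySem.Chars.isalnum, Bool.or_eq_true_iff] at h
        rcases h with h | h
        · simp [h]
        · exact absurd h hd

lemma pvMangle_main : ∀ (c2 : String), (∃ c cs, c2.toList = c :: cs ∧
      (c == '_' || PySem.Chars.isalpha c) = true ∧
      (∀ ch ∈ cs, (ch == '_' || PySem.Chars.isalnum ch) = true)) →
    pv_is_valid_parameter_name
      (if pvKwlist.contains c2 then String.ofList (c2.toList ++ ['_', '_']) else c2) = true := by
  intro c2 ⟨c, cs, htl, hc, hcs⟩
  by_cases hkw : pvKwlist.contains c2 = true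
  · rw [if_pos hkw]
    simp only [pv_is_valid_parameter_name, pvIsIdentifier, Bool.and_eq_true, Bool.not_eq_true']
    rw [String.toList_ofList, htl]
    refine ⟨⟨by simp, ?_⟩, ?_⟩
    · simp only [List.cons_append, Bool.and_eq_true]
      refine ⟨hc, ?_⟩
      rw [List.all_eq_true]
      intro ch hch
      rcases List.mem_append.mp hch with hch | hch
      · exact hcs ch hch
      · rcases List.mem_cons.mp hch with rfl | hch
        · simp
        rcases List.mem_cons.mp hch with rfl | hch
        · simp
        · simp at hch
    · by_contra hmem
      simp only [Bool.not_eq_false] at hmem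
      have hmem' := List.mem_of_elem_eq_true hmem
      refine pvKw_no_underscore _ hmem' ?_
      rw [String.toList_ofList]; simp
  · rw [if_neg hkw]
    simp only [pv_is_valid_parameter_name, pvIsIdentifier, Bool.and_eq_true, Bool.not_eq_true']
    rw [htl]
    refine ⟨⟨by simp, ?_⟩, Bool.not_eq_true _ ▸ (by simpa using hkw)⟩
    simp only [Bool.and_eq_true]
    exact ⟨hc, by rw [List.all_eq_true]; exact hcs⟩

lemma pvMangle_valid (name : String) :
    pv_is_valid_parameter_name (pv_mangle_base_name name) = true := by
  unfold pv_mangle_base_name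
  refine pvMangle_kernel pvMangle_main _ ?_
  intro ch hch
  rcases List.mem_map.mp hch with ⟨x, _, hx⟩
  by_cases h : (x == '_' || PySem.Chars.isalnum x) = true
  · rw [if_pos h] at hx; rw [hx] at h; exact h
  · rw [if_neg h] at hx; rw [← hx]; simp

-- --- membership and nodup of pvTails ---

lemma pvTails_foldl_mem (pre : List Char) : ∀ (l : List String) (t0 : PySem.Set String) (x : String),
    x ∈ l.foldl
      (fun t name =>
        if PySem.Chars.startswith name.toList pre then
          t.add (String.ofList (name.toList.drop pre.length))
        else t) t0 ↔
    x ∈ t0 ∨ ∃ name ∈ l, PySem.Chars.startswith name.toList pre = true ∧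
      x = String.ofList (name.toList.drop pre.length) := by
  intro l
  induction l with
  | nil => simp
  | cons n rest ih =>
    intro t0 x
    simp only [List.foldl_cons]
    by_cases hp : PySem.Chars.startswith n.toList pre = true
    · rw [if_pos hp, ih]
      rw [PySem.Set.mem_add]
      constructor
      · rintro ((h | h) | ⟨m, hm, h1, h2⟩)
        · exact Or.inl h
        · exact Or.inr ⟨n, by simp, hp, h⟩
        · exact Or.inr ⟨m, by simp [hm], h1, h2⟩
      · rintro (h | ⟨m, hm, h1, h2⟩)
        · exact Or.inl (Or.inl h)
        · rcases List.mem_cons.mp hm with rfl | hm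
          · exact Or.inl (Or.inr h2)
          · exact Or.inr ⟨m, hm, h1, h2⟩
    · rw [if_neg hp, ih]
      constructor
      · rintro (h | ⟨m, hm, h1, h2⟩)
        · exact Or.inl h
        · exact Or.inr ⟨m, by simp [hm], h1, h2⟩
      · rintro (h | ⟨m, hm, h1, h2⟩)
        · exact Or.inl h
        · rcases List.mem_cons.mp hm with rfl | hm
          · exact absurd h1 hp
          · exact Or.inr ⟨m, hm, h1, h2⟩

lemma mem_pvTails (used : PySem.Set String) (pre : List Char) (x : String) :
    x ∈ pvTails used pre ↔ ∃ name ∈ used, PySem.Chars.startswith name.toList pre = true ∧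
      x = String.ofList (name.toList.drop pre.length) := by
  unfold pvTails
  rw [pvTails_foldl_mem]
  simp [PySem.Set.empty]

-- startswith is isPrefixOf (definitional)
lemma pvStartswith_eq (l pre : List Char) : PySem.Chars.startswith l pre = pre.isPrefixOf l := by
  simp [PySem.Chars.startswith]

-- --- the bridge: str(j) ∈ tails ↔ base__j ∈ used ---

lemma pvCondB_eq_mem (used : PySem.Set String) (base : String) (j : Nat) :
    pvCondB (pvTails used (base.toList ++ ['_', '_'])) j =
      used.contains (pvFmtCand base (j : Int)) := by
  set pre := base.toList ++ ['_', '_'] with hpre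
  have hfmt : (pvFmtCand base (j : Int)).toList = pre ++ PySem.Int.toChars (j : Int) := by
    rw [pvFmtCand_toList, hpre]; simp
  have key : String.ofList (PySem.Int.toChars ((j : Nat) : Int)) ∈ pvTails used pre ↔
      pvFmtCand base (j : Int) ∈ used := by
    rw [mem_pvTails]
    constructor
    · rintro ⟨name, hmem, hsw, heq⟩
      rw [pvStartswith_eq] at hsw
      have hrest : pre ++ name.toList.drop pre.length = name.toList :=
        List.prefix_iff_eq_append.mp (List.isPrefixOf_iff_prefix.mp hsw)
      have hdrop : name.toList.drop pre.length = PySem.Int.toChars ((j : Nat) : Int) := by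
        have := congrArg String.toList heq
        rw [String.toList_ofList, String.toList_ofList] at this
        exact this.symm
      have hname : name = pvFmtCand base (j : Int) := by
        have h1 : name.toList = pre ++ PySem.Int.toChars (j : Int) := by
          rw [← hrest, hdrop]
        have h2 := congrArg String.ofList h1
        rw [String.ofList_toList] at h2
        rw [h2, pvFmtCand, hpre]
        congr 1
        simp
      rw [← hname]; exact hmem
    · intro hmem
      refine ⟨pvFmtCand base (j : Int), hmem, ?_, ?_⟩
      · rw [pvStartswith_eq, hfmt]
        exact List.isPrefixOf_iff_prefix.mpr ⟨_, rfl⟩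
      · rw [hfmt, List.drop_left]
  rw [pvCondB, Bool.eq_iff_iff, PySem.Set.contains_iff, PySem.Set.contains_iff]
  exact key

-- --- existence of a free suffix (pigeonhole): for A's condition … ---

lemma pvCond_exists_false (used : PySem.Set String) (base : String)
    (hv : pv_is_valid_parameter_name base = true) :
    ∃ j, j ≤ used.length ∧ pvCond used base j = false := by
  by_contra hforall
  simp only [not_exists, not_and] at hforall
  have hall : ∀ j ≤ used.length, pvFmtCand base (j : Int) ∈ used := by
    intro j hj
    have := hforall j hj
    simp only [Bool.not_eq_false] at this
    simp only [pvCond, pvValid_fmtCand base j hv, Bool.not_true, Bool.or_false] at this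
    exact (PySem.Set.contains_iff used _).mp this
  have hinj : Function.Injective (fun j : Nat => pvFmtCand base (j : Int)) := by
    intro i j hij
    have h2 := congrArg String.toList hij
    simp only [pvFmtCand_toList, pvToChars_natCast] at h2
    have h3 := List.append_cancel_left h2
    simp only [List.cons.injEq, true_and] at h3
    exact pvToDigits_inj h3
  have hnodup : ((List.range (used.length + 1)).map (fun j : Nat => pvFmtCand base (j : Int))).Nodup :=
    List.Nodup.map hinj List.nodup_range
  have hsub : ((List.range (used.length + 1)).map (fun j : Nat => pvFmtCand base (j : Int))) ⊆ used := by
    intro x hx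
    rcases List.mem_map.mp hx with ⟨j, hj, rfl⟩
    exact hall j (Nat.lt_succ_iff.mp (List.mem_range.mp hj))
  have := List.Subperm.length_le (List.subperm_of_subset hnodup hsub)
  simp at this

-- --- … and for B's condition ---

lemma pvCondB_exists_false (tails : PySem.Set String) :
    ∃ j, j ≤ tails.length ∧ pvCondB tails j = false := by
  by_contra hforall
  simp only [not_exists, not_and] at hforall
  have hall : ∀ j ≤ tails.length, String.ofList (PySem.Int.toChars ((j : Nat) : Int)) ∈ tails := by
    intro j hj
    have := hforall j hj
    simp only [Bool.not_eq_false, pvCondB] at this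
    exact (PySem.Set.contains_iff tails _).mp this
  have hinj : Function.Injective (fun j : Nat => String.ofList (PySem.Int.toChars ((j : Nat) : Int))) :=
    fun i j hij => pvStr_inj hij
  have hnodup : ((List.range (tails.length + 1)).map
      (fun j : Nat => String.ofList (PySem.Int.toChars ((j : Nat) : Int)))).Nodup :=
    List.Nodup.map hinj List.nodup_range
  have hsub : ((List.range (tails.length + 1)).map
      (fun j : Nat => String.ofList (PySem.Int.toChars ((j : Nat) : Int)))) ⊆ tails := by
    intro x hx
    rcases List.mem_map.mp hx with ⟨j, hj, rfl⟩
    exact hall j (Nat.lt_succ_iff.mp (List.mem_range.mp hj))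
  have := List.Subperm.length_le (List.subperm_of_subset hnodup hsub)
  simp at this

-- --- the two loops both land on the least index falsifying their condition ---

lemma pyA_candLoop_run (used : PySem.Set String) (base : String)
    (hex : ∃ j, pvCond used base j = false) :
    ∀ (fuel s : Nat), s ≤ Nat.find hex → Nat.find hex - s < fuel →
      pyA_candLoop used base (pvFmtCand base (s : Int)) ((s : Int) + 1) fuel =
        pvFmtCand base ((Nat.find hex : Nat) : Int) := by
  intro fuel
  induction fuel with
  | zero => omega
  | succ fuel ih =>
    intro s hs hf
    simp only [pyA_candLoop]
    by_cases hc : pvCond used base s = true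
    · have hne : s ≠ Nat.find hex := by
        intro heq; rw [heq] at hc; rw [Nat.find_spec hex] at hc; exact Bool.false_ne_true hc
      rw [if_pos (by simpa [pvCond] using hc)]
      have h1 : (s : Int) + 1 = ((s + 1 : Nat) : Int) := by push_cast; ring
      rw [h1]
      exact ih (s + 1) (by omega) (by omega)
    · have hle : Nat.find hex ≤ s := Nat.find_min' hex (by simpa using hc)
      have : s = Nat.find hex := by omega
      rw [if_neg (by simpa [pvCond] using hc), this]

lemma pvMexLoop_run (tails : PySem.Set String)
    (hex : ∃ j, pvCondB tails j = false) :
    ∀ (fuel s : Nat), s ≤ Nat.find hex → Nat.find hex - s < fuel →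
      pvMexLoop tails (s : Int) fuel = ((Nat.find hex : Nat) : Int) := by
  intro fuel
  induction fuel with
  | zero => omega
  | succ fuel ih =>
    intro s hs hf
    simp only [pvMexLoop]
    by_cases hc : pvCondB tails s = true
    · have hne : s ≠ Nat.find hex := by
        intro heq; rw [heq] at hc; rw [Nat.find_spec hex] at hc; exact Bool.false_ne_true hc
      rw [if_pos (by simpa [pvCondB] using hc)]
      have h1 : (s : Int) + 1 = ((s + 1 : Nat) : Int) := by push_cast; ring
      rw [h1]
      exact ih (s + 1) (by omega) (by omega)
    · have hle : Nat.find hex ≤ s := Nat.find_min' hex (by simpa using hc)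
      have : s = Nat.find hex := by omega
      rw [if_neg (by simpa [pvCondB] using hc), this]

-- --- one step of each fold is the same function (on a nodup used set) ---

lemma pvStep_eq (used : PySem.Set String) (mapping : PySem.Dict String String)
    (raw : String) :
    pvStepA (used, mapping) raw = pvStepB (used, mapping) raw := by
  set base := if pv_is_valid_parameter_name raw then raw else pv_mangle_base_name raw with hbase
  have hvb : pv_is_valid_parameter_name base = true := by
    rw [hbase]
    by_cases h : pv_is_valid_parameter_name raw = true
    · rw [if_pos h]; exact h
    · rw [if_neg h]; exact pvMangle_valid raw
  by_cases hc : used.contains base = true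
  · -- collision branch
    have hmemb : base ∈ used := (PySem.Set.contains_iff _ _).mp hc
    set pre := base.toList ++ ['_', '_'] with hpre
    set tails := pvTails used pre with htails
    -- the two loop conditions agree pointwise
    have hcond : ∀ j : Nat, pvCond used base j = pvCondB tails j := by
      intro j
      rw [htails, hpre, pvCondB_eq_mem used base j, pvCond,
        pvValid_fmtCand base j hvb]
      simp
    obtain ⟨j0, hj0le, hj0⟩ := pvCond_exists_false used base hvb
    have hexA : ∃ j, pvCond used base j = false := ⟨j0, hj0⟩
    obtain ⟨j1, hj1le, hj1⟩ := pvCondB_exists_false tails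
    have hexB : ∃ j, pvCondB tails j = false := ⟨j1, hj1⟩
    have hfind : Nat.find hexA = Nat.find hexB :=
      Nat.find_congr' (fun {n} => by rw [hcond n])
    have hfindleA : Nat.find hexA ≤ used.length := le_trans (Nat.find_min' hexA hj0) hj0le
    have hfindleB : Nat.find hexB ≤ tails.length := le_trans (Nat.find_min' hexB hj1) hj1le
    -- A's loop result
    have hA : pyA_candLoop used base base 0 (used.length + 2) =
        pvFmtCand base ((Nat.find hexA : Nat) : Int) := by
      simp only [pyA_candLoop]
      rw [if_pos (by simp [hmemb])]
      have h0 : pvFmtCand base 0 = pvFmtCand base ((0 : Nat) : Int) := by norm_num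
      have h1 : (0 : Int) + 1 = ((0 : Nat) : Int) + 1 := by norm_num
      rw [h0, h1]
      exact pyA_candLoop_run used base hexA (used.length + 1) 0 (by omega) (by omega)
    -- B's loop result
    have hB : pvMexLoop tails 0 (tails.length + 1) = ((Nat.find hexB : Nat) : Int) := by
      have h0 : (0 : Int) = ((0 : Nat) : Int) := by norm_num
      rw [h0]
      exact pvMexLoop_run tails hexB (tails.length + 1) 0 (by omega) (by omega)
    have hcand : String.ofList (pre ++ PySem.Int.toChars (pvMexLoop tails 0 (tails.length + 1))) =
        pvFmtCand base ((Nat.find hexA : Nat) : Int) := by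
      rw [hB, ← hfind, pvFmtCand, hpre]
      congr 1
      simp
    show (used.add (pyA_candLoop used base base 0 (used.length + 2)),
          mapping.insert raw (pyA_candLoop used base base 0 (used.length + 2))) = _
    rw [hA]
    simp only [pvStepB, ← hbase, ← hpre, ← htails]
    rw [if_pos hc, hcand]
  · -- no collision: both take base directly
    have hnmem : base ∉ used := fun hmem => hc ((PySem.Set.contains_iff _ _).mpr hmem)
    have hA : pyA_candLoop used base base 0 (used.length + 2) = base := by
      simp only [pyA_candLoop]
      rw [if_neg (by simp [hnmem, hvb])]
    show (used.add (pyA_candLoop used base base 0 (used.length + 2)),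
          mapping.insert raw (pyA_candLoop used base base 0 (used.length + 2))) = _
    rw [hA]
    simp only [pvStepB, ← hbase]
    rw [if_neg (by simp [hnmem])]

-- --- the folds coincide (pvStepA and pvStepB are the same function on pairs) ---

lemma pvFold_eq : ∀ (raws : List String) (used : PySem.Set String)
    (mapping : PySem.Dict String String),
    raws.foldl pvStepA (used, mapping) = raws.foldl pvStepB (used, mapping) := by
  intro raws
  induction raws with
  | nil => intro _ _; rfl
  | cons raw rest ih =>
    intro used mapping
    simp only [List.foldl_cons]
    rw [← pvStep_eq used mapping raw]
    exact ih (pvStepA (used, mapping) raw).1 (pvStepA (used, mapping) raw).2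

-- ===== VERDICT (by name: the statement is the Claim_ definition above) =====
theorem build_runtime_name_map_py_spec : Claim_equal_build_runtime_name_map_py := by
  intro raw_names reserved_names _
  show build_runtime_name_map_py raw_names reserved_names =
    build_runtime_name_map_py_alt raw_names reserved_names
  unfold build_runtime_name_map_py build_runtime_name_map_py_alt
  rw [pvFold_eq raw_names (PySem.Set.ofList reserved_names) PySem.Dict.empty]
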